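/-
  GENERATED by c/gen_symbols.py from toy2.sym (the PROGRAM only (the base is in the shared library)) — do not edit; re-run the script when the image is re-linked.

  `Symbols`: one number per symbol of the image. `symbols`: this build. `Symbols.rt`: the runtime's entry points as the
  parameter record of Asan/Runtime.lean. `Symbols.image`: the `Image` for given file bytes.
-/
import Asan.Runtime
import ProgX.Base.Symbols
import ProgX.Start
namespace Toy2

/-- The symbols of the image (`nm`): functions, named objects, section marks. -/
structure Symbols where
  /-- `compare_records`: function (static), 119 bytes -/
  compare_records : Nat
  /-- `store_word`: function (static), 69 bytes -/
  store_word : Nat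
  /-- `count_magic`: function (static), 81 bytes -/
  count_magic : Nat
  /-- `scaled_sum`: function (static), 122 bytes -/
  scaled_sum : Nat
  /-- `_sub_I_65535_1`: function (static), 24 bytes -/
  sub_I_65535_1 : Nat
  /-- `__text_end`: function -/
  text_end : Nat
  /-- `__rodata_start`: read-only mark / object -/
  rodata_start : Nat
  /-- `magic`: read-only object (static), 4 bytes -/
  magic : Nat
  /-- `__rodata_end`: read-only mark / object -/
  rodata_end : Nat
  /-- `__data_start`: data mark / object -/
  data_start : Nat
  /-- `scale`: data mark / object, 8 bytes -/
  scale : Nat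
  /-- `__data_end`: data mark / object -/
  data_end : Nat
  /-- `__bss_start`: bss mark / object -/
  bss_start : Nat
  /-- `comparisons`: bss object (static), 8 bytes -/
  comparisons : Nat
  /-- `histogram`: bss object (static), 64 bytes -/
  histogram : Nat
  /-- `__bss_end`: bss mark / object -/
  bss_end : Nat
  /-- `__image_end`: bss mark / object -/
  image_end : Nat

/-- The addresses of this build (toy2.sym). -/
def symbols : Symbols where
  compare_records := 0x105260
  store_word := 0x105360
  count_magic := 0x105440
  scaled_sum := 0x105520
  sub_I_65535_1 := 0x105620
  text_end := 0x1056c0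
  rodata_start := 0x141100
  magic := 0x141200
  rodata_end := 0x141360
  data_start := 0x141800
  scale := 0x141800
  data_end := 0x141a40
  bss_start := 0x141d00
  comparisons := 0x141d00
  histogram := 0x141d40
  bss_end := 0x141dc0
  image_end := 0x141dc0

/-- The runtime's entry points, for the contracts of Asan/Runtime.lean. -/
def Symbols.rt (S : Symbols) : Asan.RtSymbols where
  report := UInt64.ofNat ProgX.Base.symbols.asan_report
  rangeBad := UInt64.ofNat ProgX.Base.symbols.range_bad
  load1 := UInt64.ofNat ProgX.Base.symbols.asan_load1_noabort
  store1 := UInt64.ofNat ProgX.Base.symbols.asan_store1_noabort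
  load2 := UInt64.ofNat ProgX.Base.symbols.asan_load2_noabort
  store2 := UInt64.ofNat ProgX.Base.symbols.asan_store2_noabort
  load4 := UInt64.ofNat ProgX.Base.symbols.asan_load4_noabort
  store4 := UInt64.ofNat ProgX.Base.symbols.asan_store4_noabort
  load8 := UInt64.ofNat ProgX.Base.symbols.asan_load8_noabort
  store8 := UInt64.ofNat ProgX.Base.symbols.asan_store8_noabort
  load16 := UInt64.ofNat ProgX.Base.symbols.asan_load16_noabort
  store16 := UInt64.ofNat ProgX.Base.symbols.asan_store16_noabort
  storeN := UInt64.ofNat ProgX.Base.symbols.asan_storeN_noabort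
  arenaUnpoison := UInt64.ofNat ProgX.Base.symbols.arena_unpoison
  arenaPoison := UInt64.ofNat ProgX.Base.symbols.arena_poison
  registerGlobals := UInt64.ofNat ProgX.Base.symbols.asan_register_globals
  ctor := UInt64.ofNat S.sub_I_65535_1
  runCtors := UInt64.ofNat ProgX.Base.symbols.run_ctors
  initArrayStart := ProgX.Base.symbols.init_array_start
  initArrayEnd := ProgX.Base.symbols.init_array_end

/-- The `Image` of ProgX/Start.lean for the file bytes `bytes` (toy2.bin) and these symbols. -/
def Symbols.image (S : Symbols) (bytes : Array UInt8) : ProgX.Image where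
  bytes := bytes
  imageEnd := S.image_end
  textEnd := ProgX.Base.symbols.text_cap
  entry := UInt64.ofNat ProgX.Base.symbols.start
  exit := UInt64.ofNat ProgX.Base.symbols.prog_exit
  report := UInt64.ofNat ProgX.Base.symbols.asan_report

end Toy2
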